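-- pv_equiv track=rewrite | github.com/benquick123/code-profiling | code/batch-1/vse-naloge-brez-testov/DN7-M-204.py | brez_sosedov
-- ===== SOURCE A (Python) =====
-- def sosedov(x, y, mine):
--     """
--     Vrni število sosedov polja s koordinatami `(x, y)` na katerih je mina.
--     Polje samo ne šteje.
--
--     Args:
--         x (int): koordinata x
--         y (int): koordinata y
--         mine (set of tuple of int): koordinate min
--
--     Returns:
--         int: število sosedov
--     """
--
--
--     return len([z for z in [(a, b) for a in range(x-1, x+2)  for b in range (y-1, y+2) if a != x or b != y] if z in mine])
--
-- def brez_sosedov(mine, s, v):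
--     """
--     Vrni množico koordinat polj brez min na sosednjih poljih. Polje samo lahko
--     vsebuje mino.
--
--     Args:
--         mine (set of tuple of int): koordinate min
--         s (int): širina polja
--         v (int): višina polja
--
--     Returns:
--         set of tuple: polja brez min na sosednjih poljih
--     """
--     mnozica = set()
--     for x in range(s):
--         for y in range(v):
--             st_min = sosedov(x, y , mine)
--             if st_min == 0:
--                 mnozica.add((x,y))
--
--     return mnozica
-- ===== SOURCE B (Python) =====
-- def brez_sosedov(mine, s, v):
--     tainted = set()
--     for (mx, my) in mine:
--         for dx in (-1, 0, 1):
--             for dy in (-1, 0, 1):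
--                 if dx or dy:
--                     tainted.add((mx + dx, my + dy))
--     return {(x, y) for x in range(s) for y in range(v) if (x, y) not in tainted}
-- ===== Notes on version B (the rewrite author's own statement) =====
-- stated objective: alternative
-- what changed: Instead of probing all 8 neighbours of every grid cell and counting hits in mine, B makes one pass over the mines building a 'tainted' set of mine-adjacent cells and then includes each grid cell with a single membership test.
import Mathlib
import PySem

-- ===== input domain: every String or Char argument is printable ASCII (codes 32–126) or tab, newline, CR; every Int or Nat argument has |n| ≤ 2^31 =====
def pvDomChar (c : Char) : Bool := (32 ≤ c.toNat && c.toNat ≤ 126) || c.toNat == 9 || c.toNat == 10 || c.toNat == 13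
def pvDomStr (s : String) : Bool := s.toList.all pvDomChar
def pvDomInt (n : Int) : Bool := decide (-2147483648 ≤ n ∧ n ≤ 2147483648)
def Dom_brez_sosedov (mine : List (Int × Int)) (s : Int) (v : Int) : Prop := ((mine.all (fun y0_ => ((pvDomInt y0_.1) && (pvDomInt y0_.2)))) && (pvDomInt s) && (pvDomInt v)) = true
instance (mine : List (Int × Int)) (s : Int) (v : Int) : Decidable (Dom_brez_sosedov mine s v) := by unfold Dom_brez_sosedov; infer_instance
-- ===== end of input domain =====

-- B replaces A's per-cell probing of all 8 neighbours by one pass over the mines that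
-- builds a 'tainted' set of mine-adjacent cells, then one membership test per grid cell
-- (objective: alternative decomposition, same result set in the same cell order).

-- ===== PORT A =====
-- [(a, b) for a in range(x-1, x+2) for b in range(y-1, y+2) if a != x or b != y]
def sosedovNeigh (x y : Int) : List (Int × Int) :=
  (PySem.List.pyRange (x-1) (x+2) 1).flatMap (fun a =>
    ((PySem.List.pyRange (y-1) (y+2) 1).filter (fun b => decide (a ≠ x ∨ b ≠ y))).map (fun b => (a, b)))

-- len([z for z in … if z in mine])
def sosedov (x y : Int) (mine : List (Int × Int)) : Int :=
  ((sosedovNeigh x y).filter (fun z => mine.contains z)).length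

def brez_sosedov (mine : List (Int × Int)) (s : Int) (v : Int) : List (Int × Int) :=
  (PySem.List.pyRange 0 s 1).foldl (fun acc x =>
    (PySem.List.pyRange 0 v 1).foldl (fun acc y =>
      if sosedov x y mine = 0 then PySem.Set.add acc (x, y) else acc) acc) PySem.Set.empty

-- ===== PORT B =====
-- tainted = set(); for (mx, my) in mine: for dx in (-1,0,1): for dy in (-1,0,1): if dx or dy: tainted.add((mx+dx, my+dy))
def tainted (mine : List (Int × Int)) : PySem.Set (Int × Int) :=
  mine.foldl (fun t m =>
    ([-1, 0, 1] : List Int).foldl (fun t dx =>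
      ([-1, 0, 1] : List Int).foldl (fun t dy =>
        if dx ≠ 0 ∨ dy ≠ 0 then PySem.Set.add t (m.1 + dx, m.2 + dy) else t) t) t) PySem.Set.empty

-- {(x, y) for x in range(s) for y in range(v) if (x, y) not in tainted}
def brez_sosedov_alt (mine : List (Int × Int)) (s : Int) (v : Int) : List (Int × Int) :=
  PySem.Set.ofList ((PySem.List.pyRange 0 s 1).flatMap (fun x =>
    ((PySem.List.pyRange 0 v 1).filter (fun y => !(PySem.Set.contains (tainted mine) (x, y)))).map (fun y => (x, y))))

-- ===== PRECONDITION & SPEC =====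
def Spec_brez_sosedov (mine : List (Int × Int)) (s : Int) (v : Int) (out : List (Int × Int)) : Prop := out = brez_sosedov_alt mine s v
instance (mine : List (Int × Int)) (s : Int) (v : Int) (out : List (Int × Int)) : Decidable (Spec_brez_sosedov mine s v out) := by unfold Spec_brez_sosedov; infer_instance

-- ===== CLAIM (what is proved, stated in full; the proofs are below) =====
def Claim_equal_brez_sosedov : Prop := ∀ (mine : List (Int × Int)) (s : Int) (v : Int), Dom_brez_sosedov mine s v → Spec_brez_sosedov mine s v (brez_sosedov mine s v)

-- ===== LEMMAS AND PROOFS =====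

-- the common predicate: some cell adjacent to (x, y) (not (x, y) itself) carries a mine
def nearMine (mine : List (Int × Int)) (x y : Int) : Prop :=
  ∃ m ∈ mine, x - 1 ≤ m.1 ∧ m.1 ≤ x + 1 ∧ y - 1 ≤ m.2 ∧ m.2 ≤ y + 1 ∧ (m.1 ≠ x ∨ m.2 ≠ y)

lemma mem_tainted_step (t : PySem.Set (Int × Int)) (m q : Int × Int) :
    q ∈ (([-1, 0, 1] : List Int).foldl (fun t dx =>
      ([-1, 0, 1] : List Int).foldl (fun t dy =>
        if dx ≠ 0 ∨ dy ≠ 0 then PySem.Set.add t (m.1 + dx, m.2 + dy) else t) t) t)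
    ↔ q ∈ t ∨ (m.1 - 1 ≤ q.1 ∧ q.1 ≤ m.1 + 1 ∧ m.2 - 1 ≤ q.2 ∧ q.2 ≤ m.2 + 1 ∧ (q.1 ≠ m.1 ∨ q.2 ≠ m.2)) := by
  obtain ⟨q1, q2⟩ := q
  by_cases hq : (q1, q2) ∈ t
  · simp [List.foldl, PySem.Set.mem_add, hq]
  · simp [List.foldl, PySem.Set.mem_add, hq, Prod.ext_iff]
    omega

lemma mem_tainted_from (mine : List (Int × Int)) (t : PySem.Set (Int × Int)) (q : Int × Int) :
    q ∈ (mine.foldl (fun t m =>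
      ([-1, 0, 1] : List Int).foldl (fun t dx =>
        ([-1, 0, 1] : List Int).foldl (fun t dy =>
          if dx ≠ 0 ∨ dy ≠ 0 then PySem.Set.add t (m.1 + dx, m.2 + dy) else t) t) t) t)
    ↔ q ∈ t ∨ nearMine mine q.1 q.2 := by
  induction mine generalizing t with
  | nil => simp [nearMine]
  | cons m ms ih =>
    rw [List.foldl_cons, ih, mem_tainted_step]
    unfold nearMine
    constructor
    · rintro ((h | h) | ⟨w, hw, hh⟩)
      · exact Or.inl h
      · exact Or.inr ⟨m, List.mem_cons_self, by omega⟩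
      · exact Or.inr ⟨w, List.mem_cons_of_mem _ hw, hh⟩
    · rintro (h | ⟨w, hw, hh⟩)
      · exact Or.inl (Or.inl h)
      · rcases List.mem_cons.mp hw with h1 | h1
        · subst h1; exact Or.inl (Or.inr (by omega))
        · exact Or.inr ⟨w, h1, hh⟩

lemma contains_tainted (mine : List (Int × Int)) (x y : Int) :
    PySem.Set.contains (tainted mine) (x, y) = true ↔ nearMine mine x y := by
  rw [PySem.Set.contains_iff]
  unfold tainted
  rw [mem_tainted_from]
  simp [PySem.Set.empty]

lemma sosedov_eq_zero_iff (x y : Int) (mine : List (Int × Int)) :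
    sosedov x y mine = 0 ↔ ¬ nearMine mine x y := by
  unfold sosedov nearMine
  rw [show ((((sosedovNeigh x y).filter (fun z => mine.contains z)).length : Int) = 0 ↔
      ((sosedovNeigh x y).filter (fun z => mine.contains z)) = []) by
    simp [List.length_eq_zero_iff]]
  rw [List.filter_eq_nil_iff]
  unfold sosedovNeigh
  simp [PySem.List.mem_pyRange_one]
  constructor
  · intro h m1 m2 hmem h1 h2 h3 h4
    by_contra hne
    exact h m1 m2 m1 (by omega) (by omega) m2 (by omega) (by omega) (by tauto) rfl rfl hmem
  · intro h a b x1 hx1 hx2 x2 hy1 hy2 hne he1 he2 hmem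
    subst he1; subst he2
    have := h x1 x2 hmem (by omega) (by omega) (by omega) (by omega)
    omega

-- A's inner 'if … add' loop is a fold of Set.add over the filtered, mapped list
lemma foldl_if_add {α β : Type} [BEq α] (l : List β) (p : β → Bool) (f : β → α) (acc : PySem.Set α) :
    l.foldl (fun acc y => if p y then PySem.Set.add acc (f y) else acc) acc
      = ((l.filter p).map f).foldl PySem.Set.add acc := by
  induction l generalizing acc with
  | nil => rfl
  | cons y ys ih =>
    by_cases hp : p y <;> simp [hp, ih]

lemma foldl_flatMap_add {α β : Type} [BEq α] (l : List β) (g : β → List α) (acc : PySem.Set α) :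
    l.foldl (fun acc x => (g x).foldl PySem.Set.add acc) acc
      = (l.flatMap g).foldl PySem.Set.add acc := by
  induction l generalizing acc with
  | nil => rfl
  | cons x xs ih => simp [List.flatMap_cons, List.foldl_append, ih]

theorem brez_sosedov_eq (mine : List (Int × Int)) (s v : Int) :
    brez_sosedov mine s v = brez_sosedov_alt mine s v := by
  unfold brez_sosedov brez_sosedov_alt
  rw [PySem.Set.ofList_eq_foldl, ← foldl_flatMap_add]
  apply PySem.List.foldl_congr_mem
  intro acc x _
  rw [← foldl_if_add]
  apply PySem.List.foldl_congr_mem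
  intro acc2 y _
  congr 1
  rw [show (sosedov x y mine = 0) = ((!PySem.Set.contains (tainted mine) (x, y)) = true) from
    propext (by rw [sosedov_eq_zero_iff, ← contains_tainted]; simp)]

-- ===== VERDICT (by name: the statement is the Claim_ definition above) =====
theorem brez_sosedov_spec : Claim_equal_brez_sosedov := by
  intro mine s v _
  unfold Spec_brez_sosedov
  exact brez_sosedov_eq mine s v
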